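-- pv_equiv track=rewrite | github.com/ypzhang725/Longshot | emp-sh2pc/funcPy.py | seperateBin
-- ===== SOURCE A (Python) =====
-- def computePrefix(test_list):
--     res = [sum(test_list[ : i + 1]) for i in range(len(test_list))]
--     return res
--
-- def seperateBin(sorted_data, sortDPdHist):
--     numBin = len(sortDPdHist)
--     seperatedData = [None]*numBin
--     dpHistPrefix_tmp = computePrefix(sortDPdHist)
--     dpHistPrefix_tmp[numBin-1] = len(sorted_data)
--     dpHistPrefix = [0]*(numBin+1)
--     for j in range(numBin):
--         dpHistPrefix[j+1] = dpHistPrefix_tmp[j]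
--     for j in range(numBin):
--         seperatedData[j] = sorted_data[dpHistPrefix[j]: dpHistPrefix[j+1]].copy()
--
--     return seperatedData
-- ===== SOURCE B (Python) =====
-- def seperateBin(sorted_data, sortDPdHist):
--     bins = []
--     prev = 0
--     for h in sortDPdHist[:-1]:
--         nxt = prev + h
--         bins.append(sorted_data[prev:nxt])
--         prev = nxt
--     bins.append(sorted_data[prev:])
--     return bins
-- ===== Notes on version B (the rewrite author's own statement) =====
-- stated objective: faster
-- what changed: B keeps one running prefix sum while slicing in a single pass over the histogram, instead of A's computePrefix that re-sums a growing slice for every bin and A's extra index-filling loop over an auxiliary prefix array.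
-- outside the precondition, e.g. on seperateBin([1], []): A raises IndexError, B returns [[1]]
import Mathlib
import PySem

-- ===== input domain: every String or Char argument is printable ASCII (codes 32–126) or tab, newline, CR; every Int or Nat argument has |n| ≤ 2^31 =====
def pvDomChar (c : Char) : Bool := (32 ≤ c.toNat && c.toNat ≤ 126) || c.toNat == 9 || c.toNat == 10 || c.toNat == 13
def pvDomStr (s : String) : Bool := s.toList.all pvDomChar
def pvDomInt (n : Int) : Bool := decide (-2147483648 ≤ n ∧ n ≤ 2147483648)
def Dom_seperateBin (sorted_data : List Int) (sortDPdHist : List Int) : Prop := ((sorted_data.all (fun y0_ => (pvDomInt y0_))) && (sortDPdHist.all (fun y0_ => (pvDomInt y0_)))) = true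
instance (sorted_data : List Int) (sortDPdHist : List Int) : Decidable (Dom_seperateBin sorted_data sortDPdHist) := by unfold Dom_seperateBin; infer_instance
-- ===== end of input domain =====

-- B replaces A's quadratic re-summing of histogram prefixes by one running-sum pass over the histogram (objective: faster).
-- Pre_ excludes only the empty histogram, on which A raises IndexError.


-- ===== PORT A =====
def computePrefix (test_list : List Int) : List Int :=
  (PySem.List.pyRange 0 (test_list.length : Int) 1).map
    (fun i => (PySem.List.slice test_list none (some (i + 1))).sum)

def seperateBin (sorted_data : List Int) (sortDPdHist : List Int) : List (List Int) :=
  let numBin : Int := (sortDPdHist.length : Int)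
  let dpHistPrefix_tmp := computePrefix sortDPdHist
  let dpHistPrefix_tmp := PySem.List.pySetD dpHistPrefix_tmp (numBin - 1) (sorted_data.length : Int)
  let dpHistPrefix :=
    (PySem.List.pyRange 0 numBin 1).foldl
      (fun acc j => PySem.List.pySetD acc (j + 1) (PySem.List.pyGetD dpHistPrefix_tmp j 0))
      (List.replicate (sortDPdHist.length + 1) 0)
  (PySem.List.pyRange 0 numBin 1).map
    (fun j => PySem.List.slice sorted_data (some (PySem.List.pyGetD dpHistPrefix j 0))
                (some (PySem.List.pyGetD dpHistPrefix (j + 1) 0)))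

-- ===== PORT B =====
def seperateBin_alt (sorted_data : List Int) (sortDPdHist : List Int) : List (List Int) :=
  let st :=
    (PySem.List.slice sortDPdHist none (some (-1))).foldl
      (fun (st : List (List Int) × Int) h =>
        let nxt := st.2 + h
        (st.1 ++ [PySem.List.slice sorted_data (some st.2) (some nxt)], nxt))
      ([], 0)
  st.1 ++ [PySem.List.slice sorted_data (some st.2) none]

-- ===== PRECONDITION & SPEC =====
-- A raises IndexError on an empty histogram (dpHistPrefix_tmp[numBin-1] indexes an empty list); excluded.
def Pre_seperateBin (sorted_data : List Int) (sortDPdHist : List Int) : Prop := sortDPdHist ≠ []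
instance (sorted_data : List Int) (sortDPdHist : List Int) : Decidable (Pre_seperateBin sorted_data sortDPdHist) := by unfold Pre_seperateBin; infer_instance
def pvWitness_seperateBin : List Int × List Int := ([1, 2, 3, 4], [1, 2, 1])

def Spec_seperateBin (sorted_data : List Int) (sortDPdHist : List Int) (out : List (List Int)) : Prop := out = seperateBin_alt sorted_data sortDPdHist
instance (sorted_data : List Int) (sortDPdHist : List Int) (out : List (List Int)) : Decidable (Spec_seperateBin sorted_data sortDPdHist out) := by unfold Spec_seperateBin; infer_instance

-- ===== CLAIM (what is proved, stated in full; the proofs are below) =====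
def Claim_equal_seperateBin : Prop := ∀ (sorted_data : List Int) (sortDPdHist : List Int), Dom_seperateBin sorted_data sortDPdHist → Pre_seperateBin sorted_data sortDPdHist → Spec_seperateBin sorted_data sortDPdHist (seperateBin sorted_data sortDPdHist)

-- ===== LEMMAS AND PROOFS =====
lemma slice_some_len (xs : List Int) (a : Int) :
    PySem.List.slice xs (some a) (some (xs.length : Int)) = PySem.List.slice xs (some a) none := by
  simp [PySem.List.slice, PySem.List.clampIdx]
  split_ifs <;> omega

lemma computePrefix_eq (t : List Int) :
    computePrefix t = (List.range t.length).map (fun i => (t.take (i + 1)).sum) := by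
  unfold computePrefix
  rw [PySem.List.pyRange_zero_nat]
  simp only [List.map_map]
  apply List.map_congr_left
  intro i hi
  simp only [Function.comp]
  rw [show ((i : Int) + 1) = ((i + 1 : Nat) : Int) by push_cast; ring, PySem.List.slice_to_natCast]

lemma fold_dp (t : List Int) :
    ∀ (m : Nat) (acc : List Int), m ≤ t.length → t.length + 1 ≤ acc.length →
      (PySem.List.pyRange 0 (m : Int) 1).foldl
        (fun acc j => PySem.List.pySetD acc (j + 1) (PySem.List.pyGetD t j 0)) acc
      = acc.take 1 ++ t.take m ++ acc.drop (m + 1) := by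
  intro m
  induction m with
  | zero =>
    intro acc _ hacc
    rw [PySem.List.pyRange_one_eq_nil (by simp)]
    simp only [List.foldl_nil, List.take_zero, List.append_nil]
    exact (List.take_append_drop 1 acc).symm
  | succ m ih =>
    intro acc hm hacc
    rw [show ((m + 1 : Nat) : Int) = (m : Int) + 1 by push_cast; ring,
        PySem.List.pyRange_one_succ_right (by positivity), List.foldl_append,
        ih acc (by omega) hacc]
    simp only [List.foldl_cons, List.foldl_nil]
    rw [show ((m : Int) + 1) = ((m + 1 : Nat) : Int) by push_cast; ring,
        PySem.List.pySetD_natCast, PySem.List.pyGetD_natCast]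
    have h1 : (acc.take 1).length = 1 := by rw [List.length_take]; omega
    rw [List.append_assoc, List.set_append_right _ _ (by omega : (acc.take 1).length ≤ m + 1)]
    rw [h1, show m + 1 - 1 = m from rfl]
    rw [List.set_append_right _ _ (by rw [List.length_take]; omega : (t.take m).length ≤ m)]
    rw [show m - (t.take m).length = 0 by rw [List.length_take]; omega]
    rw [List.drop_eq_getElem_cons (by omega : m + 1 < acc.length)]
    simp only [List.set_cons_zero]
    rw [List.getD_eq_getElem t 0 (show m < t.length by omega)]
    rw [List.take_succ_eq_append_getElem (show m < t.length by omega)]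
    simp only [List.append_assoc, List.cons_append, List.nil_append]

lemma fold_B (data : List Int) (ys : List Int) :
    ∀ (bins : List (List Int)) (p : Int),
      ys.foldl
        (fun (st : List (List Int) × Int) h =>
          (st.1 ++ [PySem.List.slice data (some st.2) (some (st.2 + h))], st.2 + h))
        (bins, p)
      = (bins ++ (List.range ys.length).map
            (fun k => PySem.List.slice data (some (p + (ys.take k).sum)) (some (p + (ys.take (k + 1)).sum))),
         p + ys.sum) := by
  induction ys with
  | nil => intro bins p; simp
  | cons h tl ih =>
    intro bins p
    simp only [List.foldl_cons, ih, List.length_cons, List.range_succ_eq_map, List.map_cons,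
      List.map_map, List.sum_cons, List.take_zero, List.take_succ_cons, List.sum_nil, List.sum_cons]
    rw [Prod.mk.injEq]
    constructor
    · rw [List.append_assoc]
      congr 1
      simp only [List.singleton_append]
      congr 1
      · norm_num
      · apply List.map_congr_left
        intro k _
        simp only [Function.comp_apply, Nat.succ_eq_add_one, List.take_succ_cons, List.sum_cons]
        ring_nf
    · ring

lemma seperateBin_eq_alt (data hist : List Int) (hpre : hist ≠ []) :
    seperateBin data hist = seperateBin_alt data hist := by
  have hn1 : 1 ≤ hist.length := List.length_pos_of_ne_nil hpre
  simp only [seperateBin, seperateBin_alt, computePrefix_eq]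
  rw [PySem.List.slice_to_neg_one, fold_B data hist.dropLast [] 0]
  set L : Int := (data.length : Int) with hL
  set t' : List Int :=
    ((List.range hist.length).map (fun i => (hist.take (i + 1)).sum)).set (hist.length - 1) L with ht'
  have hset : PySem.List.pySetD ((List.range hist.length).map fun i => (hist.take (i + 1)).sum)
      ((hist.length : Int) - 1) L = t' := by
    rw [show ((hist.length : Int) - 1) = ((hist.length - 1 : Nat) : Int) by omega,
        PySem.List.pySetD_natCast]
  have hlen_t' : t'.length = hist.length := by simp [ht']
  rw [hset, fold_dp t' hist.length (List.replicate (hist.length + 1) 0) (by omega) (by simp; omega)]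
  have hdp : (List.replicate (hist.length + 1) (0:Int)).take 1 ++ t'.take hist.length ++
      (List.replicate (hist.length + 1) (0:Int)).drop (hist.length + 1) = 0 :: t' := by
    rw [List.take_replicate, List.drop_replicate]
    simp [List.take_of_length_le (le_of_eq hlen_t')]
  rw [hdp, PySem.List.pyRange_zero_nat]
  simp only [List.nil_append]
  have hgetD : ∀ k : Nat, k ≤ hist.length → (0 :: t').getD k 0 =
      if k = hist.length then L else (hist.take k).sum := by
    intro k hk
    match k with
    | 0 => simp [List.getD]; omega
    | k + 1 =>
      have hk' : k < t'.length := by rw [hlen_t']; omega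
      rw [List.getD_cons_succ, List.getD_eq_getElem _ 0 hk']
      simp only [ht', List.getElem_set, List.getElem_map, List.getElem_range]
      split_ifs <;> first | rfl | omega
  have htake : ∀ k : Nat, k ≤ hist.length - 1 → hist.dropLast.take k = hist.take k := by
    intro k hk
    rw [List.dropLast_eq_take, List.take_take]
    congr 1
    omega
  apply List.ext_getElem
  · simp; omega
  · intro i h1 h2
    simp only [List.getElem_map, List.getElem_range, PySem.List.pyGetD_natCast]
    have hiN : i < hist.length := by simpa using h1
    rw [show ((i : Int) + 1) = ((i + 1 : Nat) : Int) by push_cast; ring,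
        PySem.List.pyGetD_natCast]
    by_cases hi : i < hist.length - 1
    · rw [List.getElem_append_left (by simp; omega)]
      simp only [List.getElem_map, List.getElem_range]
      rw [htake i (by omega), htake (i + 1) (by omega)]
      rw [hgetD i (by omega), hgetD (i + 1) (by omega),
          if_neg (by omega), if_neg (by omega)]
      norm_num
    · have hieq : i = hist.length - 1 := by omega
      rw [List.getElem_append_right (by simp; omega), List.getElem_singleton]
      rw [hgetD i (by omega), hgetD (i + 1) (by omega), if_neg (by omega), if_pos (by omega)]
      rw [List.dropLast_eq_take, hL, zero_add, slice_some_len, hieq]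

-- ===== VERDICT (by name: the statement is the Claim_ definition above) =====
theorem seperateBin_spec : Claim_equal_seperateBin := by
  intro sorted_data sortDPdHist _ hpre
  exact seperateBin_eq_alt sorted_data sortDPdHist hpre
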